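-- pv_equiv track=rewrite | github.com/feaksel/FPGA-Firewall-Project | scripts/inspect_signaltap_csv.py | _last_nonx_per_field
-- ===== SOURCE A (Python) =====
-- def _last_nonx_per_field(rows: list[dict[str, str]], fields: list[str]) -> dict[str, str]:
--     """Build a synthetic row that contains, for each field, the most recent non-X value.
--
--     SignalTap CSV exports often have leading and trailing rows where signals
--     show as ``X`` (uninitialized / outside the valid sample window). The literal
--     last row is therefore not a reliable source of "current state". We scan
--     each column independently and take the last value that doesn't contain X.
--     """
--     snapshot: dict[str, str] = {}
--     for field in fields:
--         for row in reversed(rows):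
--             v = row.get(field, "").strip()
--             if v and "X" not in v.upper():
--                 snapshot[field] = v
--                 break
--         else:
--             snapshot[field] = rows[-1].get(field, "")
--     return snapshot
-- ===== SOURCE B (Python) =====
-- def _last_nonx_per_field(rows: list[dict[str, str]], fields: list[str]) -> dict[str, str]:
--     # Per-field functional pipeline: collect the column's valid (non-empty,
--     # X-free) values in order, take the last, else fall back to the last row.
--     def valid(s: str) -> bool:
--         return bool(s) and not any(c in ("x", "X") for c in s)
--
--     def last_valid(f: str) -> str:
--         hits = [v for row in rows if valid(v := row.get(f, "").strip())]
--         return hits[-1] if hits else rows[-1].get(f, "")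
--
--     return {f: last_valid(f) for f in fields}
-- ===== Notes on version B (the rewrite author's own statement) =====
-- stated objective: alternative
-- what changed: B replaces A's per-field reverse scan with break/for-else by a per-field functional pipeline: filter the column's valid (non-empty, X-free) values into a list and take its last element, falling back to the last row's raw value when the list is empty.
import Mathlib
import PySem

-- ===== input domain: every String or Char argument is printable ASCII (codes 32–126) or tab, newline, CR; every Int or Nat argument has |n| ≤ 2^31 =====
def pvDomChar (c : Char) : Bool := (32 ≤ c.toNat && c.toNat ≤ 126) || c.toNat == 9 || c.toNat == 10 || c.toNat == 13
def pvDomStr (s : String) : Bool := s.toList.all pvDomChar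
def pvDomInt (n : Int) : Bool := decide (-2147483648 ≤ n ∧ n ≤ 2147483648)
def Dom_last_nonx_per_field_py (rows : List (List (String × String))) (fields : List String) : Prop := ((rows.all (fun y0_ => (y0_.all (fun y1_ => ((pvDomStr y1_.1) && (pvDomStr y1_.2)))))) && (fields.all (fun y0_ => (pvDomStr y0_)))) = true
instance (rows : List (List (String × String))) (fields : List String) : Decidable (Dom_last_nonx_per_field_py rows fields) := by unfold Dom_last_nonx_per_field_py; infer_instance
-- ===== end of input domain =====

-- B replaces A's per-field reverse scan with break/for-else by a per-field functional
-- pipeline: filter the column's valid values into a list and take its last element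
-- (objective: alternative decomposition, same cost).

-- ===== PORT A =====
-- row.get(field, "") — first match in the association list, like Python's dict lookup
def pvRowGet (row : List (String × String)) (f : String) : String :=
  (PySem.Dict.mk row).getD f ""

-- v = row.get(field, "").strip()
def pvVal (row : List (String × String)) (f : String) : String :=
  PySem.Str.strip (pvRowGet row f)

-- inner 'for row in reversed(rows): … break' — first valid value in the given list
def pvScanA (f : String) : List (List (String × String)) → Option String
  | [] => none
  | row :: rest =>
      let v := pvVal row f
      if v ≠ "" ∧ PySem.Str.isIn "X" (PySem.Str.upper v) = false then some v
      else pvScanA f rest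

def last_nonx_per_field_py (rows : List (List (String × String))) (fields : List String) : List (String × String) :=
  (fields.foldl (fun (snap : PySem.Dict String String) f =>
      match pvScanA f rows.reverse with
      | some v => snap.insert f v
      | none =>
          -- for-else: snapshot[field] = rows[-1].get(field, ""); rows = [] is excluded by Pre_
          snap.insert f ((PySem.Dict.mk ((PySem.List.pyGet? rows (-1)).getD [])).getD f "")) PySem.Dict.empty).items

-- ===== PORT B =====
-- valid(s): bool(s) and not any(c in ("x", "X") for c in s); for a 1-char c,
-- 'c in ("x", "X")' is exactly the equality test c = 'x' or c = 'X'
def pvBValid (s : String) : Bool :=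
  !(s == "") && !(s.toList.any (fun c => c == 'x' || c == 'X'))

-- one row's contribution to the comprehension [v for row in rows if valid(v := row.get(f, "").strip())]
def pvBHit (f : String) (row : List (String × String)) : Option String :=
  if pvBValid (PySem.Str.strip ((PySem.Dict.mk row).getD f "")) then
    some (PySem.Str.strip ((PySem.Dict.mk row).getD f "")) else none

-- last_valid(f): hits[-1] if hits else rows[-1].get(f, "")
def pvBLastValid (rows : List (List (String × String))) (f : String) : String :=
  let hits := rows.filterMap (pvBHit f)
  if hits ≠ [] then (PySem.List.pyGet? hits (-1)).getD ""
  else (PySem.Dict.mk ((PySem.List.pyGet? rows (-1)).getD [])).getD f ""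

def last_nonx_per_field_py_alt (rows : List (List (String × String))) (fields : List String) : List (String × String) :=
  -- {f: last_valid(f) for f in fields}
  (fields.foldl (fun (d : PySem.Dict String String) f => d.insert f (pvBLastValid rows f)) PySem.Dict.empty).items

-- ===== PRECONDITION & SPEC =====
-- Pre_ excludes only (rows = [], fields ≠ []), where both Pythons raise IndexError on rows[-1].
def Pre_last_nonx_per_field_py (rows : List (List (String × String))) (fields : List String) : Prop :=
  fields = [] ∨ rows ≠ []
instance (rows : List (List (String × String))) (fields : List String) : Decidable (Pre_last_nonx_per_field_py rows fields) := by unfold Pre_last_nonx_per_field_py; infer_instance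

def pvWitness_last_nonx_per_field_py : (List (List (String × String))) × List String :=
  ([[("sig", "X"), ("clk", "1")]], ["sig", "clk"])

def Spec_last_nonx_per_field_py (rows : List (List (String × String))) (fields : List String) (out : List (String × String)) : Prop := out = last_nonx_per_field_py_alt rows fields
instance (rows : List (List (String × String))) (fields : List String) (out : List (String × String)) : Decidable (Spec_last_nonx_per_field_py rows fields out) := by unfold Spec_last_nonx_per_field_py; infer_instance

-- ===== CLAIM (what is proved, stated in full; the proofs are below) =====
def Claim_equal_last_nonx_per_field_py : Prop := ∀ (rows : List (List (String × String))) (fields : List String), Dom_last_nonx_per_field_py rows fields → Pre_last_nonx_per_field_py rows fields → Spec_last_nonx_per_field_py rows fields (last_nonx_per_field_py rows fields)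

-- ===== LEMMAS AND PROOFS =====

-- upperChar hits 'X' exactly on 'x' and 'X'
theorem pvUpperChar_eq_X (c : Char) : PySem.Chars.upperChar c = 'X' ↔ (c = 'x' ∨ c = 'X') := by
  unfold PySem.Chars.upperChar PySem.Chars.islower
  have hx : ('x' : Char).toNat = 120 := rfl
  have hX : ('X' : Char).toNat = 88 := rfl
  split_ifs with h
  · simp only [Bool.and_eq_true, decide_eq_true_eq, Char.le_def] at h
    have h1 : 97 ≤ c.toNat := h.1
    have h2 : c.toNat ≤ 122 := h.2
    have hv : Nat.isValidChar (c.toNat - 32) := Or.inl (by omega)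
    constructor
    · intro he
      have : (Char.ofNat (c.toNat - 32)).toNat = c.toNat - 32 := by
        unfold Char.ofNat
        rw [dif_pos hv]
        exact Char.toNat_ofNatAux hv
      rw [he, hX] at this
      left
      exact Char.ext (UInt32.toNat_inj.mp (show c.toNat = ('x' : Char).toNat by omega))
    · rintro (he | he)
      · subst he; decide
      · subst he; exact absurd h1 (by decide)
  · simp only [Bool.and_eq_true, decide_eq_true_eq, Char.le_def, not_and] at h
    constructor
    · intro he; right; exact he
    · rintro (he | he)
      · exfalso; subst he; revert h; decide
      · exact he

-- A's validity test equals B's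
theorem pvValid_eq (v : String) :
    ((v ≠ "" ∧ PySem.Str.isIn "X" (PySem.Str.upper v) = false) ↔ pvBValid v = true) := by
  unfold pvBValid
  simp only [Bool.and_eq_true, Bool.not_eq_true', beq_eq_false_iff_ne, ne_eq,
    List.any_eq_false]
  constructor
  · rintro ⟨h1, h2⟩
    refine ⟨h1, fun c hc => ?_⟩
    have hni : ¬ (("X" : String).toList <:+: (PySem.Str.upper v).toList) := by
      intro hin
      rw [← PySem.Str.isIn_iff_infix] at hin
      rw [h2] at hin; cases hin
    rw [PySem.Str.toList_upper] at hni
    have : ('X' : Char) ∉ PySem.Chars.upper v.toList := by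
      intro hm
      exact hni ((List.singleton_infix_iff 'X' _).mpr hm)
    simp only [Bool.or_eq_true, beq_iff_eq, not_or]
    refine ⟨fun he => this ?_, fun he => this ?_⟩
    · unfold PySem.Chars.upper
      exact List.mem_map.mpr ⟨c, hc, (pvUpperChar_eq_X c).mpr (Or.inl he)⟩
    · unfold PySem.Chars.upper
      exact List.mem_map.mpr ⟨c, hc, (pvUpperChar_eq_X c).mpr (Or.inr he)⟩
  · rintro ⟨h1, h2⟩
    refine ⟨h1, ?_⟩
    by_contra hne
    have htrue : PySem.Str.isIn "X" (PySem.Str.upper v) = true := by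
      cases hb : PySem.Str.isIn "X" (PySem.Str.upper v)
      · exact absurd hb hne
      · rfl
    have hin := (PySem.Str.isIn_iff_infix _ _).mp htrue
    rw [PySem.Str.toList_upper] at hin
    have hm : ('X' : Char) ∈ PySem.Chars.upper v.toList :=
      (List.singleton_infix_iff 'X' _).mp hin
    unfold PySem.Chars.upper at hm
    obtain ⟨c, hc, he⟩ := List.mem_map.mp hm
    rcases (pvUpperChar_eq_X c).mp he with h | h
    · exact h2 c hc (by simp [h])
    · exact h2 c hc (by simp [h])

-- A's per-row option equals B's
theorem pvStep_eq (f : String) (row : List (String × String)) :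
    (if pvVal row f ≠ "" ∧ PySem.Str.isIn "X" (PySem.Str.upper (pvVal row f)) = false
      then some (pvVal row f) else none) = pvBHit f row := by
  unfold pvBHit pvVal pvRowGet
  by_cases h : (PySem.Str.strip ((PySem.Dict.mk row).getD f "") ≠ "" ∧
      PySem.Str.isIn "X" (PySem.Str.upper (PySem.Str.strip ((PySem.Dict.mk row).getD f ""))) = false)
  · rw [if_pos h, if_pos ((pvValid_eq _).mp h)]
  · rw [if_neg h, if_neg (fun hb => h ((pvValid_eq _).mpr hb))]

-- A's reverse scan is findSome? of B's per-row option
theorem pvScanA_eq_findSome (f : String) (l : List (List (String × String))) :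
    pvScanA f l = l.findSome? (pvBHit f) := by
  induction l with
  | nil => rfl
  | cons row rest ih =>
      show (if pvVal row f ≠ "" ∧ PySem.Str.isIn "X" (PySem.Str.upper (pvVal row f)) = false
        then some (pvVal row f) else pvScanA f rest) = _
      rw [List.findSome?_cons, ← pvStep_eq f row]
      split_ifs with h <;> simp [ih]

-- the per-field values of the two ports coincide
theorem pvValue_eq (rows : List (List (String × String))) (f : String) :
    (match pvScanA f rows.reverse with
      | some v => v
      | none => (PySem.Dict.mk ((PySem.List.pyGet? rows (-1)).getD [])).getD f "") =
    pvBLastValid rows f := by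
  unfold pvBLastValid
  rw [pvScanA_eq_findSome, ← List.head?_filterMap, List.filterMap_reverse, List.head?_reverse,
    PySem.List.pyGet?_neg_one]
  cases h : (rows.filterMap (pvBHit f)).getLast? with
  | none =>
      rw [if_neg (by simp [List.getLast?_eq_none_iff.mp h])]
  | some v =>
      have hne : rows.filterMap (pvBHit f) ≠ [] := by
        intro hx; rw [hx] at h; cases h
      rw [if_pos hne, PySem.List.pyGet?_neg_one, h]
      rfl

-- ===== VERDICT (by name: the statement is the Claim_ definition above) =====
theorem last_nonx_per_field_py_spec : Claim_equal_last_nonx_per_field_py := by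
  intro rows fields _ _
  show last_nonx_per_field_py rows fields = last_nonx_per_field_py_alt rows fields
  unfold last_nonx_per_field_py last_nonx_per_field_py_alt
  have hfun : (fun (snap : PySem.Dict String String) f =>
      match pvScanA f rows.reverse with
      | some v => snap.insert f v
      | none =>
          snap.insert f ((PySem.Dict.mk ((PySem.List.pyGet? rows (-1)).getD [])).getD f "")) =
      (fun (d : PySem.Dict String String) f => d.insert f (pvBLastValid rows f)) := by
    funext snap f
    rw [← pvValue_eq rows f]
    cases pvScanA f rows.reverse <;> rfl
  rw [hfun]
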